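-- pv_equiv track=rewrite | github.com/yustero/csb | 4_state_project/programs/first_implementation/artificial.py | peripheral
-- ===== SOURCE A (Python) =====
-- def peripheral(mat):
--     per=0
--     for i in range(len(mat)):
--         checkin=0
--         checkout=0
--         for j in range(len(mat)):
--             if mat[i][j]!=0:
--                 checkout+=1
--
--             elif mat[j][i]!=0:
--                 checkin+=1
--
--         if checkin==0 or checkout==0:
--             per+=1
--     return per
-- ===== SOURCE B (Python) =====
-- def peripheral(mat):
--     n = len(mat)
--     has_out = [False] * n
--     strict_in = [False] * n
--     for u in range(n):
--         for v in range(n):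
--             if mat[u][v] != 0:
--                 has_out[u] = True
--                 if mat[v][u] == 0:
--                     strict_in[v] = True
--     return n - sum(1 for i in range(n) if has_out[i] and strict_in[i])
-- ===== Notes on version B (the rewrite author's own statement) =====
-- stated objective: alternative
-- what changed: Instead of A's per-row counter accumulation (checkin/checkout per i), B makes one edge-driven marking pass that, for every nonzero entry (u,v), sets has_out[u] and, when the reverse entry is zero, strict_in[v] in two boolean arrays, and then counts peripheral rows by complement: n minus the rows marked in both arrays.
import Mathlib
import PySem

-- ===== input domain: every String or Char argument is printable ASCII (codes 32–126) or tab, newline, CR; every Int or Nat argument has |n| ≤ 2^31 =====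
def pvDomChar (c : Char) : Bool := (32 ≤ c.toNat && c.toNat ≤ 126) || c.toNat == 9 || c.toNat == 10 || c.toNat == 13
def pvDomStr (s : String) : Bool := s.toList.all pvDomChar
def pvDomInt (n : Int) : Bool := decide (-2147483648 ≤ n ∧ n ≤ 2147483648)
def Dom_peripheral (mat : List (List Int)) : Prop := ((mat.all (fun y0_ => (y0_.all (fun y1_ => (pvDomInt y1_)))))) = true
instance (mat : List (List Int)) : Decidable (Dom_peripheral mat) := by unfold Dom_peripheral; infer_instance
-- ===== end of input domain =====

-- B replaces A's per-row checkin/checkout counters by one edge-driven marking pass into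
-- two boolean arrays (has_out / strict_in) and counts peripheral rows by complement
-- (n minus rows marked in both) — an alternative decomposition, same O(n^2) cost.

-- ===== PORT A =====
-- entry mat[i][j]; indices are in range whenever Pre_peripheral holds, so getD is exact there
def pvEntry (mat : List (List Int)) (i j : Nat) : Int := (mat.getD i []).getD j 0

def peripheral (mat : List (List Int)) : Int :=
  (List.range mat.length).foldl
    (fun per i =>
      let c :=
        (List.range mat.length).foldl
          (fun (c : Int × Int) j =>
            if pvEntry mat i j ≠ 0 then (c.1, c.2 + 1)
            else if pvEntry mat j i ≠ 0 then (c.1 + 1, c.2)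
            else c)
          (0, 0)
      if c.1 = 0 ∨ c.2 = 0 then per + 1 else per)
    0

-- ===== PORT B =====
-- one step of B's marking pass on the pair (u, v) = (p.1, p.2)
def pvMark (mat : List (List Int)) (st : List Bool × List Bool) (p : Nat × Nat) :
    List Bool × List Bool :=
  if pvEntry mat p.1 p.2 ≠ 0 then
    if pvEntry mat p.2 p.1 = 0 then (st.1.set p.1 true, st.2.set p.2 true)
    else (st.1.set p.1 true, st.2)
  else st

def peripheral_alt (mat : List (List Int)) : Int :=
  let n := mat.length
  let st :=
    (List.range n).foldl
      (fun st u => (List.range n).foldl (fun st v => pvMark mat st (u, v)) st)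
      (List.replicate n false, List.replicate n false)
  (n : Int) - ((List.range n).countP (fun i => st.1.getD i false && st.2.getD i false) : Nat)

-- ===== PRECONDITION & SPEC =====
-- Pre_ excludes ragged matrices with a row shorter than len(mat): there Python A raises IndexError.
def Pre_peripheral (mat : List (List Int)) : Prop :=
  ∀ row ∈ mat, mat.length ≤ row.length
instance (mat : List (List Int)) : Decidable (Pre_peripheral mat) := by
  unfold Pre_peripheral; infer_instance

def pvWitness_peripheral : List (List Int) := [[1, 0], [0, 1]]

def Spec_peripheral (mat : List (List Int)) (out : Int) : Prop := out = peripheral_alt mat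
instance (mat : List (List Int)) (out : Int) : Decidable (Spec_peripheral mat out) := by unfold Spec_peripheral; infer_instance

-- ===== CLAIM (what is proved, stated in full; the proofs are below) =====
def Claim_equal_peripheral : Prop := ∀ (mat : List (List Int)), Dom_peripheral mat → Pre_peripheral mat → Spec_peripheral mat (peripheral mat)

-- ===== LEMMAS AND PROOFS =====

-- A's inner loop computes the two counters as countP's over the traversed list
theorem inner_foldl (f g : Nat → Int) (l : List Nat) (a b : Int) :
    l.foldl
      (fun (c : Int × Int) j =>
        if f j ≠ 0 then (c.1, c.2 + 1)
        else if g j ≠ 0 then (c.1 + 1, c.2)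
        else c)
      (a, b)
    = (a + l.countP (fun j => decide (f j = 0 ∧ g j ≠ 0)),
       b + l.countP (fun j => decide (f j ≠ 0))) := by
  induction l generalizing a b with
  | nil => simp
  | cons x xs ih =>
    rw [List.foldl_cons, List.countP_cons, List.countP_cons]
    by_cases hx : f x = 0 <;> by_cases hg : g x = 0 <;>
      simp only [hx, hg, ne_eq, not_true_eq_false, not_false_eq_true, if_true, if_false,
        ih, decide_eq_true_eq] <;>
      simp [Prod.ext_iff] <;> ring

-- A's outer loop counts rows satisfying its condition
theorem outer_foldl (p : Nat → Prop) [DecidablePred p] (l : List Nat) (per : Int) :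
    l.foldl (fun per i => if p i then per + 1 else per) per
    = per + l.countP (fun i => decide (p i)) := by
  induction l generalizing per with
  | nil => simp
  | cons x xs ih =>
    by_cases hx : p x <;> simp [List.foldl_cons, hx, ih] <;> ring

-- pvMark preserves the lengths of both boolean lists
theorem pvMark_len (mat : List (List Int)) (st : List Bool × List Bool) (p : Nat × Nat) :
    (pvMark mat st p).1.length = st.1.length ∧ (pvMark mat st p).2.length = st.2.length := by
  unfold pvMark; split_ifs <;> simp

-- getD after a set-to-true
theorem getD_set_true (l : List Bool) (u i : Nat) :
    (l.set u true).getD i false = ((u = i ∧ i < l.length) || l.getD i false) := by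
  rw [List.getD_eq_getElem?_getD, List.getD_eq_getElem?_getD, List.getElem?_set]
  by_cases h : u = i
  · subst h
    by_cases hl : u < l.length <;> simp [hl]
  · simp [h]

theorem getD_replicate (n i : Nat) : (List.replicate n false).getD i false = false := by
  rw [List.getD_eq_getElem?_getD, List.getElem?_replicate]
  split <;> rfl

-- what B's marking fold leaves at position i, for any pair list L
theorem mark_foldl (mat : List (List Int)) (L : List (Nat × Nat))
    (st : List Bool × List Bool) (i : Nat) :
    (L.foldl (pvMark mat) st).1.getD i false
      = (st.1.getD i false
         || L.any (fun p => decide (p.1 = i ∧ i < st.1.length ∧ pvEntry mat p.1 p.2 ≠ 0)))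
    ∧ (L.foldl (pvMark mat) st).2.getD i false
      = (st.2.getD i false
         || L.any (fun p => decide (p.2 = i ∧ i < st.2.length ∧
              pvEntry mat p.1 p.2 ≠ 0 ∧ pvEntry mat p.2 p.1 = 0))) := by
  induction L generalizing st with
  | nil => simp
  | cons q Q ih =>
    rw [List.foldl_cons, List.any_cons, List.any_cons]
    obtain ⟨ih1, ih2⟩ := ih (pvMark mat st q)
    obtain ⟨hl1, hl2⟩ := pvMark_len mat st q
    rw [ih1, ih2, hl1, hl2]
    constructor
    · unfold pvMark
      split_ifs with h1 h2 <;>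
        rw [Bool.eq_iff_iff] <;>
        simp only [getD_set_true, Bool.or_eq_true, decide_eq_true_eq] <;> tauto
    · unfold pvMark
      split_ifs with h1 h2 <;>
        rw [Bool.eq_iff_iff] <;>
        simp only [getD_set_true, Bool.or_eq_true, decide_eq_true_eq] <;> tauto

-- countP of the negation: l.countP (!p) = l.length - l.countP p
theorem countP_not (l : List Nat) (p : Nat → Bool) :
    l.countP (fun x => !p x) = l.length - l.countP p := by
  induction l with
  | nil => simp
  | cons x xs ih =>
    rw [List.countP_cons, List.countP_cons]
    have := List.countP_le_length (p := p) (l := xs)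
    by_cases hx : p x = true <;> simp [hx, ih] <;> omega

-- ===== VERDICT (by name: the statement is the Claim_ definition above) =====
theorem peripheral_spec : Claim_equal_peripheral := by
  intro mat _ _
  unfold Spec_peripheral peripheral peripheral_alt
  dsimp only
  set n := mat.length with hn
  -- B side: collapse the nested fold to a fold over the pair list, read off the marks
  rw [show
      (List.range n).foldl
        (fun st u => (List.range n).foldl (fun st v => pvMark mat st (u, v)) st)
        (List.replicate n false, List.replicate n false)
      = ((List.range n).flatMap (fun u => (List.range n).map (fun v => (u, v)))).foldl
          (pvMark mat) (List.replicate n false, List.replicate n false) by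
    rw [List.foldl_flatMap]
    simp [List.foldl_map]]
  -- A side: counters and the outer count
  rw [outer_foldl
    (p := fun i =>
      ((List.range n).foldl
          (fun (c : Int × Int) j =>
            if pvEntry mat i j ≠ 0 then (c.1, c.2 + 1)
            else if pvEntry mat j i ≠ 0 then (c.1 + 1, c.2)
            else c)
          (0, 0)).1 = 0
      ∨ ((List.range n).foldl
          (fun (c : Int × Int) j =>
            if pvEntry mat i j ≠ 0 then (c.1, c.2 + 1)
            else if pvEntry mat j i ≠ 0 then (c.1 + 1, c.2)
            else c)
          (0, 0)).2 = 0)]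
  rw [zero_add]
  -- rewrite B's counted predicate as the negation of A's predicate
  have hcong :
      (List.range n).countP
        (fun i =>
          (((List.range n).flatMap (fun u => (List.range n).map (fun v => (u, v)))).foldl
              (pvMark mat) (List.replicate n false, List.replicate n false)).1.getD i false
          && (((List.range n).flatMap (fun u => (List.range n).map (fun v => (u, v)))).foldl
              (pvMark mat) (List.replicate n false, List.replicate n false)).2.getD i false)
      = (List.range n).countP
        (fun i => !decide
          ((List.range n).countP (fun j => decide (pvEntry mat i j = 0 ∧ pvEntry mat j i ≠ 0)) = 0
           ∨ (List.range n).countP (fun j => decide (pvEntry mat i j ≠ 0)) = 0)) := by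
    apply List.countP_congr
    intro i hi
    rw [List.mem_range] at hi
    obtain ⟨h1, h2⟩ := mark_foldl mat
      ((List.range n).flatMap (fun u => (List.range n).map (fun v => (u, v))))
      (List.replicate n false, List.replicate n false) i
    rw [h1, h2]
    simp only [Bool.and_eq_true, Bool.false_or, Bool.not_eq_true',
      decide_eq_false_iff_not, List.any_eq_true, List.mem_flatMap, List.mem_map,
      List.mem_range, decide_eq_true_eq, List.countP_eq_zero, not_or,
      List.length_replicate, getD_replicate]
    constructor
    · rintro ⟨⟨p, ⟨u, hu, v, hv, rfl⟩, hpi, -, hne⟩, ⟨q, ⟨u', hu', v', hv', rfl⟩, hqi, -, hne', hz⟩⟩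
      simp only at hpi hqi hne hne' hz
      subst hpi; subst hqi
      refine ⟨fun hall => ?_, fun hall => ?_⟩
      · exact hall u' hu' ⟨hz, hne'⟩
      · exact hall v hv hne
    · rintro ⟨hcin, hcout⟩
      push_neg at hcin hcout
      obtain ⟨j, hj, hz, hne⟩ := hcin
      obtain ⟨k, hk, hkne⟩ := hcout
      exact ⟨⟨(i, k), ⟨i, hi, k, hk, rfl⟩, rfl, hi, hkne⟩,
             ⟨(j, i), ⟨j, hj, i, hi, rfl⟩, rfl, hi, hne, hz⟩⟩
  rw [hcong, countP_not, List.length_range]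
  have hle : (List.range n).countP
      (fun i => decide
        ((List.range n).countP (fun j => decide (pvEntry mat i j = 0 ∧ pvEntry mat j i ≠ 0)) = 0
         ∨ (List.range n).countP (fun j => decide (pvEntry mat i j ≠ 0)) = 0)) ≤ n := by
    simpa using List.countP_le_length (l := List.range n)
  -- match the Nat count on the A side with the Int arithmetic on the B side
  simp only [inner_foldl, zero_add, Nat.cast_eq_zero]
  omega
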